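-- pv_equiv track=rewrite | github.com/surabhigade/video-content-gap-analyzer | __init__.py | parse_pegasus_response
-- ===== SOURCE A (Python) =====
-- def parse_pegasus_response(text: str) -> tuple:
--     """Split a Pegasus COMMON/VARIATION labeled response into two strings.
--
--     Tolerates:
--       - either label missing
--       - labels in any case, with or without markdown bolding
--       - multi-line content (lines following a label belong to that label
--         until the next label shows up)
--       - entirely unlabeled text (falls back to ``(text, "")``)
--     """
--     if not text:
--         return "", ""
--
--     text = text.strip()
--     # Strip common markdown affordances Pegasus sometimes emits
--     cleaned = text.replace("**", "").replace("__", "")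
--
--     buf = {"common": [], "variation": []}
--     current = None
--     for line in cleaned.splitlines():
--         stripped = line.strip()
--         if not stripped:
--             continue
--         upper = stripped.upper()
--         if upper.startswith("COMMON:"):
--             current = "common"
--             rest = stripped[len("COMMON:"):].strip()
--             if rest:
--                 buf[current].append(rest)
--         elif upper.startswith("VARIATION:"):
--             current = "variation"
--             rest = stripped[len("VARIATION:"):].strip()
--             if rest:
--                 buf[current].append(rest)
--         elif current is not None:
--             buf[current].append(stripped)
--
--     common = " ".join(buf["common"]).strip()
--     variation = " ".join(buf["variation"]).strip()
--
--     # Fallback: the model ignored labels — treat the whole reply as common.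
--     if not common and not variation:
--         common = cleaned.strip()
--
--     return common, variation
-- ===== SOURCE B (Python) =====
-- def _label_of(s):
--     u = s.upper()
--     if u.startswith("COMMON:"):
--         return ("common", s[len("COMMON:"):].strip())
--     if u.startswith("VARIATION:"):
--         return ("variation", s[len("VARIATION:"):].strip())
--     return None
--
--
-- def parse_pegasus_response(text: str) -> tuple:
--     """Two-pass rewrite: segment the cleaned, stripped lines at label
--     occurrences, then concatenate each segment's pieces into its bucket."""
--     if not text:
--         return "", ""
--     cleaned = text.strip().replace("**", "").replace("__", "")
--     lines = [s for s in (ln.strip() for ln in cleaned.splitlines()) if s]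
--
--     segments = []
--     i, n = 0, len(lines)
--     while i < n:
--         lab = _label_of(lines[i])
--         i += 1
--         if lab is None:
--             continue  # text before the first label is ignored
--         bucket, rest = lab
--         pieces = [rest] if rest else []
--         while i < n and _label_of(lines[i]) is None:
--             pieces.append(lines[i])
--             i += 1
--         segments.append((bucket, pieces))
--
--     common = " ".join(p for b, ps in segments if b == "common" for p in ps).strip()
--     variation = " ".join(p for b, ps in segments if b == "variation" for p in ps).strip()
--     if not common and not variation:
--         common = cleaned.strip()
--     return common, variation
-- ===== Notes on version B (the rewrite author's own statement) =====
-- stated objective: alternative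
-- what changed: Replaces A's single stateful line loop (a 'current bucket' mode variable mutated while scanning) with a two-pass decomposition: first segment the cleaned stripped lines at label occurrences into (bucket, pieces) runs via an index scan with an inner content-run loop, then concatenate the segments per bucket.
import Mathlib
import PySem

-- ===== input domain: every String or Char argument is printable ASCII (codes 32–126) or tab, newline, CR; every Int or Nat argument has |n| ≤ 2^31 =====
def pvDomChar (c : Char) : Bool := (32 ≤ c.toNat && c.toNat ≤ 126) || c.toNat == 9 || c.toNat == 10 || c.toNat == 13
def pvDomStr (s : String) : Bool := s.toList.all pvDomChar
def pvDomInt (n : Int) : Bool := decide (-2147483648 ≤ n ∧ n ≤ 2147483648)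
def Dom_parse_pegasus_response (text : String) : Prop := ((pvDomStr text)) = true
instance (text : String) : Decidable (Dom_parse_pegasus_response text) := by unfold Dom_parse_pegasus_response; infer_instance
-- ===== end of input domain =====

-- B replaces A's stateful single loop with a two-pass segmentation (label-run index then per-bucket concatenation); same values everywhere.

-- ===== PORT A =====
-- A's loop: state = (current bucket, common buffer, variation buffer)
def parse_pegasus_response_aux : List String → Option String → List String → List String → List String × List String
  | [], _, cs, vs => (cs, vs)
  | line :: rest, current, cs, vs =>
    let stripped := PySem.Str.strip line
    if stripped = "" then parse_pegasus_response_aux rest current cs vs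
    else
      let upper := PySem.Str.upper stripped
      if PySem.Str.startswith upper "COMMON:" then
        let r := PySem.Str.strip (PySem.Str.slice stripped (some 7) none)
        if r ≠ "" then parse_pegasus_response_aux rest (some "common") (cs ++ [r]) vs
        else parse_pegasus_response_aux rest (some "common") cs vs
      else if PySem.Str.startswith upper "VARIATION:" then
        let r := PySem.Str.strip (PySem.Str.slice stripped (some 10) none)
        if r ≠ "" then parse_pegasus_response_aux rest (some "variation") cs (vs ++ [r])
        else parse_pegasus_response_aux rest (some "variation") cs vs
      else
        match current with
        | some c =>
          if c = "common" then parse_pegasus_response_aux rest current (cs ++ [stripped]) vs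
          else parse_pegasus_response_aux rest current cs (vs ++ [stripped])
        | none => parse_pegasus_response_aux rest current cs vs

def parse_pegasus_response (text : String) : String × String :=
  if text = "" then ("", "")
  else
    let text1 := PySem.Str.strip text
    let cleaned := PySem.Str.replace (PySem.Str.replace text1 "**" "") "__" ""
    let bufs := parse_pegasus_response_aux (PySem.Str.splitlines cleaned) none [] []
    let common := PySem.Str.strip (PySem.Str.join " " bufs.1)
    let variation := PySem.Str.strip (PySem.Str.join " " bufs.2)
    if common = "" ∧ variation = "" then (PySem.Str.strip cleaned, variation)
    else (common, variation)

-- ===== PORT B =====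
def pvLabelOf (s : String) : Option (String × String) :=
  let u := PySem.Str.upper s
  if PySem.Str.startswith u "COMMON:" then
    some ("common", PySem.Str.strip (PySem.Str.slice s (some 7) none))
  else if PySem.Str.startswith u "VARIATION:" then
    some ("variation", PySem.Str.strip (PySem.Str.slice s (some 10) none))
  else none

def pvUnlabeled (s : String) : Bool := (pvLabelOf s).isNone

-- B's outer while loop: skip to a label, take the run of unlabeled content lines (inner while)
def pvSegments : List String → List (String × List String)
  | [] => []
  | l :: rest =>
    match pvLabelOf l with
    | none => pvSegments rest
    | some (b, r) =>
      (b, (if r ≠ "" then [r] else []) ++ rest.takeWhile pvUnlabeled)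
        :: pvSegments (rest.dropWhile pvUnlabeled)
  termination_by ls => ls.length
  decreasing_by
    · simp
    · exact Nat.lt_succ_of_le (List.length_dropWhile_le _ _)

def pvBucket (b : String) (segs : List (String × List String)) : List String :=
  ((segs.filter (fun p => p.1 = b)).map Prod.snd).flatten

def parse_pegasus_response_alt (text : String) : String × String :=
  if text = "" then ("", "")
  else
    let cleaned := PySem.Str.replace (PySem.Str.replace (PySem.Str.strip text) "**" "") "__" ""
    let lines := ((PySem.Str.splitlines cleaned).map PySem.Str.strip).filter (· ≠ "")
    let segs := pvSegments lines
    let common := PySem.Str.strip (PySem.Str.join " " (pvBucket "common" segs))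
    let variation := PySem.Str.strip (PySem.Str.join " " (pvBucket "variation" segs))
    if common = "" ∧ variation = "" then (PySem.Str.strip cleaned, variation)
    else (common, variation)

-- ===== PRECONDITION & SPEC =====
def Spec_parse_pegasus_response (text : String) (out : String × String) : Prop := out = parse_pegasus_response_alt text
instance (text : String) (out : String × String) : Decidable (Spec_parse_pegasus_response text out) := by unfold Spec_parse_pegasus_response; infer_instance

-- ===== CLAIM (what is proved, stated in full; the proofs are below) =====
def Claim_equal_parse_pegasus_response : Prop := ∀ (text : String), Dom_parse_pegasus_response text → Spec_parse_pegasus_response text (parse_pegasus_response text)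

-- ===== LEMMAS AND PROOFS =====

-- B's segmentation starting in the middle of a run for bucket `c` (A's `current`)
def pvSegsFrom : List String → Option String → List (String × List String)
  | ls, none => pvSegments ls
  | ls, some c => (c, ls.takeWhile pvUnlabeled) :: pvSegments (ls.dropWhile pvUnlabeled)

def pvProc (ls : List String) : List String := (ls.map PySem.Str.strip).filter (· ≠ "")

lemma pvBucket_cons (x b : String) (ps : List String) (z : List (String × List String)) :
    pvBucket x ((b, ps) :: z) = (if b = x then ps else []) ++ pvBucket x z := by
  by_cases h : b = x <;> simp [pvBucket, h]

lemma pvSegments_cons_label {s b r : String} (p : List String)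
    (hl : pvLabelOf s = some (b, r)) :
    pvSegments (s :: p)
      = (b, (if r ≠ "" then [r] else []) ++ p.takeWhile pvUnlabeled)
          :: pvSegments (p.dropWhile pvUnlabeled) := by
  rw [pvSegments, hl]

lemma pvSegments_cons_unlabeled {s : String} (p : List String)
    (hl : pvLabelOf s = none) :
    pvSegments (s :: p) = pvSegments p := by
  rw [pvSegments, hl]

lemma pvBucket_segsFrom_some (x b : String) (p : List String) :
    pvBucket x (pvSegsFrom p (some b))
      = (if b = x then p.takeWhile pvUnlabeled else [])
        ++ pvBucket x (pvSegments (p.dropWhile pvUnlabeled)) := by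
  simp [pvSegsFrom, pvBucket_cons]

lemma pvBucket_segsFrom_cons_label (x : String) {s b r : String} (p : List String)
    (cur : Option String) (hl : pvLabelOf s = some (b, r)) :
    pvBucket x (pvSegsFrom (s :: p) cur)
      = (if b = x then (if r ≠ "" then [r] else []) ++ p.takeWhile pvUnlabeled else [])
        ++ pvBucket x (pvSegments (p.dropWhile pvUnlabeled)) := by
  have hUnl : pvUnlabeled s = false := by simp [pvUnlabeled, hl]
  cases cur with
  | none => simp [pvSegsFrom, pvSegments_cons_label p hl, pvBucket_cons]
  | some c =>
    simp [pvSegsFrom, hUnl, pvSegments_cons_label p hl, pvBucket_cons]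

lemma pvMain (ls : List String) : ∀ (cur : Option String) (cs vs : List String),
    (cur = none ∨ cur = some "common" ∨ cur = some "variation") →
    parse_pegasus_response_aux ls cur cs vs
      = (cs ++ pvBucket "common" (pvSegsFrom (pvProc ls) cur),
         vs ++ pvBucket "variation" (pvSegsFrom (pvProc ls) cur)) := by
  induction ls with
  | nil =>
    intro cur cs vs hcur
    rcases hcur with rfl | rfl | rfl <;>
      simp [parse_pegasus_response_aux, pvProc, pvSegsFrom, pvSegments, pvBucket]
  | cons l rest ih =>
    intro cur cs vs hcur
    simp only [parse_pegasus_response_aux]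
    by_cases h1 : PySem.Str.strip l = ""
    · rw [if_pos h1, ih _ _ _ hcur]
      have hp : pvProc (l :: rest) = pvProc rest := by simp [pvProc, h1]
      rw [hp]
    · rw [if_neg h1]
      have hp : pvProc (l :: rest) = PySem.Str.strip l :: pvProc rest := by
        simp [pvProc, h1]
      rw [hp]
      by_cases hc : PySem.Str.startswith (PySem.Str.upper (PySem.Str.strip l)) "COMMON:" = true
      · have hl : pvLabelOf (PySem.Str.strip l)
            = some ("common", PySem.Str.strip (PySem.Str.slice (PySem.Str.strip l) (some 7) none)) := by
          unfold pvLabelOf; rw [if_pos hc]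
        rw [if_pos hc]
        by_cases hr : PySem.Str.strip (PySem.Str.slice (PySem.Str.strip l) (some 7) none) = ""
        · rw [if_neg (by simp [hr]), ih _ _ _ (Or.inr (Or.inl rfl))]
          rw [pvBucket_segsFrom_cons_label _ _ cur hl,
              pvBucket_segsFrom_cons_label _ _ cur hl,
              pvBucket_segsFrom_some, pvBucket_segsFrom_some]
          simp [hr]
        · rw [if_pos (by simp [hr]), ih _ _ _ (Or.inr (Or.inl rfl))]
          rw [pvBucket_segsFrom_cons_label _ _ cur hl,
              pvBucket_segsFrom_cons_label _ _ cur hl,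
              pvBucket_segsFrom_some, pvBucket_segsFrom_some]
          simp [hr]
      · rw [if_neg hc]
        by_cases hv : PySem.Str.startswith (PySem.Str.upper (PySem.Str.strip l)) "VARIATION:" = true
        · have hl : pvLabelOf (PySem.Str.strip l)
              = some ("variation", PySem.Str.strip (PySem.Str.slice (PySem.Str.strip l) (some 10) none)) := by
            unfold pvLabelOf; rw [if_neg hc, if_pos hv]
          rw [if_pos hv]
          by_cases hr : PySem.Str.strip (PySem.Str.slice (PySem.Str.strip l) (some 10) none) = ""
          · rw [if_neg (by simp [hr]), ih _ _ _ (Or.inr (Or.inr rfl))]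
            rw [pvBucket_segsFrom_cons_label _ _ cur hl,
                pvBucket_segsFrom_cons_label _ _ cur hl,
                pvBucket_segsFrom_some, pvBucket_segsFrom_some]
            simp [hr]
          · rw [if_pos (by simp [hr]), ih _ _ _ (Or.inr (Or.inr rfl))]
            rw [pvBucket_segsFrom_cons_label _ _ cur hl,
                pvBucket_segsFrom_cons_label _ _ cur hl,
                pvBucket_segsFrom_some, pvBucket_segsFrom_some]
            simp [hr]
        · have hl : pvLabelOf (PySem.Str.strip l) = none := by
            unfold pvLabelOf; rw [if_neg hc, if_neg hv]
          have hUnl : pvUnlabeled (PySem.Str.strip l) = true := by simp [pvUnlabeled, hl]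
          rw [if_neg hv]
          rcases hcur with rfl | rfl | rfl
          · have h2 := ih none cs vs (Or.inl rfl)
            simpa [pvSegsFrom, pvSegments_cons_unlabeled _ hl] using h2
          · have h2 := ih (some "common") (cs ++ [PySem.Str.strip l]) vs (Or.inr (Or.inl rfl))
            rw [pvBucket_segsFrom_some, pvBucket_segsFrom_some] at h2
            rw [pvBucket_segsFrom_some, pvBucket_segsFrom_some]
            simp only [List.takeWhile_cons, List.dropWhile_cons, hUnl]
            simp [h2]
          · have h2 := ih (some "variation") cs (vs ++ [PySem.Str.strip l]) (Or.inr (Or.inr rfl))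
            rw [pvBucket_segsFrom_some, pvBucket_segsFrom_some] at h2
            rw [pvBucket_segsFrom_some, pvBucket_segsFrom_some]
            simp only [List.takeWhile_cons, List.dropWhile_cons, hUnl]
            simp [h2]

-- ===== VERDICT (by name: the statement is the Claim_ definition above) =====
theorem parse_pegasus_response_spec : Claim_equal_parse_pegasus_response := by
  intro text _
  unfold Spec_parse_pegasus_response parse_pegasus_response parse_pegasus_response_alt
  by_cases h : text = ""
  · simp [h]
  · simp only [h, if_false]
    rw [pvMain _ none [] [] (Or.inl rfl)]
    rfl
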